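-- pv_equiv track=rewrite | github.com/iEdgir01/Math-Code | increase-decrease/Increase - Decrease.py | increase_decrease
-- ===== SOURCE A (Python) =====
-- def increase_decrease(s):
--     """
--     :type s: str
--     :rtype: int
--     """
--     int_val = 0
--     for i in range(len(s)):
--         if i > 0 and s[i] == ')':
--             int_val -= 1
--         elif i > 0 and s[i] == '(':
--             int_val += 1
--         else:
--             int_val += 1
--     return int_val
-- ===== SOURCE B (Python) =====
-- def increase_decrease(s):
--     """
--     :type s: str
--     :rtype: int
--     """
--     if not s:
--         return 0
--     tally = {}
--     for ch in s[1:]: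
--         tally[ch] = tally.get(ch, 0) + 1
--     total = 1
--     for ch, n in tally.items():
--         total += -n if ch == ')' else n
--     return total
-- ===== Notes on version B (the rewrite author's own statement) =====
-- stated objective: alternative
-- what changed: Instead of a per-index conditional loop, B builds a character histogram (dict) of s[1:] and then sums a signed weight times the multiplicity over the distinct characters, starting from 1 for the leading character.
import Mathlib
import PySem

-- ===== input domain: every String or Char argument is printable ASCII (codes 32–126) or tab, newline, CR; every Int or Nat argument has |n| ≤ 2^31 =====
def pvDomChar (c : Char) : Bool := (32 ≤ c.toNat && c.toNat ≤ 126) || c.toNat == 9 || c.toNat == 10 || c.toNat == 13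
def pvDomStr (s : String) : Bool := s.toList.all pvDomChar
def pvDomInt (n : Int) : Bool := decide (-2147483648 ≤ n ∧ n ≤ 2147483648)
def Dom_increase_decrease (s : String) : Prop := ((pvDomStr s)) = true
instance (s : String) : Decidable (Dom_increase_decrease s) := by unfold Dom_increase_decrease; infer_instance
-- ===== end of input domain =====

-- B replaces A's per-index loop by a histogram of s[1:] plus a weighted sum over distinct characters (alternative decomposition; return value only).

-- ===== PORT A =====
def increase_decrease (s : String) : Int :=
  (PySem.List.pyRange 0 (s.toList.length : Int) 1).foldl
    (fun int_val i =>
      if i > 0 ∧ PySem.List.pyGetD s.toList i ' ' = ')' then int_val - 1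
      else if i > 0 ∧ PySem.List.pyGetD s.toList i ' ' = '(' then int_val + 1
      else int_val + 1) 0

-- ===== PORT B =====
def increase_decrease_alt (s : String) : Int :=
  if s.toList = [] then 0
  else
    let t := (PySem.Str.slice s (some 1) none).toList
    let tally := t.foldl (fun d ch => d.insert ch (d.getD ch 0 + 1)) (PySem.Dict.empty : PySem.Dict Char Int)
    tally.items.foldl (fun total p => total + (if p.1 = ')' then -p.2 else p.2)) 1

-- ===== PRECONDITION & SPEC =====
def Spec_increase_decrease (s : String) (out : Int) : Prop := out = increase_decrease_alt s
instance (s : String) (out : Int) : Decidable (Spec_increase_decrease s out) := by unfold Spec_increase_decrease; infer_instance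

-- ===== CLAIM =====
def Claim_equal_increase_decrease : Prop := ∀ (s : String), Dom_increase_decrease s → Spec_increase_decrease s (increase_decrease s)

-- ===== LEMMAS AND PROOFS =====

-- weight of a character in both programs
def pvW (c : Char) : Int := if c = ')' then -1 else 1

-- B's weighted histogram sum equals the plain per-character sum.
theorem hist_sum (t : List Char) :
    ((PySem.Set.ofList t).map (fun k => if k = ')' then -((t.count k : Int)) else (t.count k : Int))).sum
      = (t.map pvW).sum := by
  have hset : (PySem.Set.ofList t : List Char).toFinset = t.toFinset := by
    ext x; simp [List.mem_toFinset, PySem.Set.mem_ofList]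
  have h1 := List.sum_toFinset (l := (PySem.Set.ofList t : List Char))
      (fun k => if k = ')' then -((t.count k : Int)) else (t.count k : Int))
      (PySem.Set.nodup_ofList t)
  rw [← h1, hset, Finset.sum_list_map_count t pvW]
  apply Finset.sum_congr rfl
  intro x _
  simp only [pvW]
  by_cases hx : x = ')' <;> simp [hx]

-- ===== VERDICT =====
theorem increase_decrease_spec : Claim_equal_increase_decrease := by
  intro s _
  show increase_decrease s = increase_decrease_alt s
  unfold increase_decrease increase_decrease_alt
  cases hl : s.toList with
  | nil => simp [PySem.List.pyRange_one_eq_nil]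
  | cons c rest =>
    simp only [reduceCtorEq, List.length_cons]
    -- B side: histogram over the tail
    have ht : (PySem.Str.slice s (some 1) none).toList = rest := by
      rw [PySem.Str.toList_slice, PySem.Chars.slice_eq_listSlice, PySem.List.slice_from_one, hl]
      rfl
    rw [ht]
    rw [PySem.Dict.foldl_insert_getD_add_one_eq_counter]
    have hfold : (PySem.Dict.counter rest).items.foldl
        (fun total p => total + (if p.1 = ')' then -p.2 else p.2)) 1
        = 1 + ((PySem.Dict.counter rest).items.map (fun p => if p.1 = ')' then -p.2 else p.2)).sum := by
      exact PySem.List.foldl_add _ _ _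
    rw [hfold, PySem.Dict.items_counter, List.map_map]
    have hB : ((PySem.Set.ofList rest : List Char).map
        ((fun p : Char × Int => if p.1 = ')' then -p.2 else p.2) ∘ (fun k => (k, (rest.count k : Int))))).sum
        = (rest.map pvW).sum := by
      have := hist_sum rest
      simpa [Function.comp] using this
    rw [hB]
    -- A side: peel index 0 then turn the range fold into a fold over the tail
    have hn : (0 : Int) < (((c :: rest).length : Int)) := by simp
    have hlen : ((rest.length + 1 : Nat) : Int) = ((c :: rest).length : Int) := by simp
    rw [hlen, PySem.List.pyRange_one_cons hn, List.foldl_cons]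
    have h0 : (if (0:Int) > 0 ∧ PySem.List.pyGetD (c :: rest) 0 ' ' = ')' then (0:Int) - 1
        else if (0:Int) > 0 ∧ PySem.List.pyGetD (c :: rest) 0 ' ' = '(' then (0:Int) + 1
        else (0:Int) + 1) = 1 := by norm_num
    rw [h0]
    have hcg : (PySem.List.pyRange (0+1) ((c :: rest).length : Int) 1).foldl
        (fun int_val i =>
          if i > 0 ∧ PySem.List.pyGetD (c :: rest) i ' ' = ')' then int_val - 1
          else if i > 0 ∧ PySem.List.pyGetD (c :: rest) i ' ' = '(' then int_val + 1
          else int_val + 1) 1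
        = (PySem.List.pyRange (0+1) ((c :: rest).length : Int) 1).foldl
        (fun acc j => acc + pvW (PySem.List.pyGetD (c :: rest) j ' ')) 1 := by
      apply PySem.List.foldl_congr_mem
      intro acc i hi
      have hipos : (0:Int) < i := by
        have := (PySem.List.mem_pyRange_one.mp hi).1
        omega
      simp only [hipos, true_and, pvW]
      split_ifs <;> ring
    rw [hcg]
    rw [PySem.List.foldl_pyRange_pyGetD'
      (f := fun acc c' => acc + pvW c') (xs := c :: rest) (d := ' ') (init := 1) (a := 0+1) (by norm_num)]
    rw [PySem.List.foldl_add]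
    rw [show ((c :: rest).drop (0+1:Int).toNat) = rest from rfl]
    simp
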